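-- pv_equiv track=rewrite | github.com/amirhoseinnaderali-pixel/AutoTune-Research-Assistan | huggingface_search.py | _infer_precision_and_quantization_from_tags
-- ===== SOURCE A (Python) =====
-- from typing import List, Dict, Any, Optional, Tuple
--
-- def _infer_precision_and_quantization_from_tags(tags: List[str]) -> Tuple[str, str]:
--     """Infer precision and quantization from common tags like bf16/fp16/int8/gguf/awq/gptq."""
--     precision = ""
--     quant = ""
--     try:
--         lower = [t.lower() for t in (tags or [])]
--         if any("bf16" in t for t in lower):
--             precision = "bf16"
--         elif any("fp16" in t or "float16" in t for t in lower):
--             precision = "fp16"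
--         elif any("fp32" in t or "float32" in t for t in lower):
--             precision = "fp32"
--         if any("gguf" in t for t in lower):
--             quant = "gguf"
--         elif any("gptq" in t for t in lower):
--             quant = "gptq"
--         elif any("awq" in t for t in lower):
--             quant = "awq"
--         elif any("int8" in t or "int4" in t for t in lower):
--             quant = "int"
--     except Exception:
--         pass
--     return precision, quant
-- ===== SOURCE B (Python) =====
-- def _infer_precision_and_quantization_from_tags(tags):
--     """Infer precision and quantization from common tags like bf16/fp16/int8/gguf/awq/gptq."""
--     bf16 = fp16 = fp32 = gguf = gptq = awq = intq = False
--     try: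
--         for t in (tags or []):
--             s = t.lower()
--             bf16 = bf16 or "bf16" in s
--             fp16 = fp16 or "fp16" in s or "float16" in s
--             fp32 = fp32 or "fp32" in s or "float32" in s
--             gguf = gguf or "gguf" in s
--             gptq = gptq or "gptq" in s
--             awq = awq or "awq" in s
--             intq = intq or "int8" in s or "int4" in s
--     except Exception:
--         pass
--     precision = "bf16" if bf16 else "fp16" if fp16 else "fp32" if fp32 else ""
--     quant = "gguf" if gguf else "gptq" if gptq else "awq" if awq else "int" if intq else ""
--     return precision, quant
-- ===== Notes on version B (the rewrite author's own statement) =====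
-- stated objective: alternative
-- what changed: B makes a single pass over the tags collecting seven presence flags (lowercasing each tag once, no intermediate lowered list) and decides precision/quant by priority afterwards, instead of A's lowered-list materialisation followed by seven separate any() scans.
import Mathlib
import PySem

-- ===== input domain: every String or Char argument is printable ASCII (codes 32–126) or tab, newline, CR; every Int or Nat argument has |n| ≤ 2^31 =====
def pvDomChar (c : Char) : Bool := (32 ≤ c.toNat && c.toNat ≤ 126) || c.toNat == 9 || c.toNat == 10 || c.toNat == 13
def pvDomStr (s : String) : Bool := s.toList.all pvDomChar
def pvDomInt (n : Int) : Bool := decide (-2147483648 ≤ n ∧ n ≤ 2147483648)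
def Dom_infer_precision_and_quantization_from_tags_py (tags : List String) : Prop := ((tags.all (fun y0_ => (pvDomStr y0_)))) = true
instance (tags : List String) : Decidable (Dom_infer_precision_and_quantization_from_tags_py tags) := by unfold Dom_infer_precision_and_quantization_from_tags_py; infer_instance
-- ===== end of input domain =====

-- B replaces A's lowered-list materialisation plus seven any() scans by one fold over the
-- tags collecting presence flags, deciding precision/quant by priority afterwards (alternative, same cost).

-- ===== PORT A =====
def infer_precision_and_quantization_from_tags_py (tags : List String) : String × String :=
  -- lower = [t.lower() for t in (tags or [])]  (tags is a list here, so 'tags or []' is tags)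
  let lower := tags.map PySem.Str.lower
  let precision :=
    if lower.any (fun t => PySem.Str.isIn "bf16" t) then "bf16"
    else if lower.any (fun t => PySem.Str.isIn "fp16" t || PySem.Str.isIn "float16" t) then "fp16"
    else if lower.any (fun t => PySem.Str.isIn "fp32" t || PySem.Str.isIn "float32" t) then "fp32"
    else ""
  let quant :=
    if lower.any (fun t => PySem.Str.isIn "gguf" t) then "gguf"
    else if lower.any (fun t => PySem.Str.isIn "gptq" t) then "gptq"
    else if lower.any (fun t => PySem.Str.isIn "awq" t) then "awq"
    else if lower.any (fun t => PySem.Str.isIn "int8" t || PySem.Str.isIn "int4" t) then "int"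
    else ""
  (precision, quant)

-- ===== PORT B =====
-- loop body of B: update the seven presence flags from one tag
def pvFlagsStep (acc : Bool × Bool × Bool × Bool × Bool × Bool × Bool) (t : String) :
    Bool × Bool × Bool × Bool × Bool × Bool × Bool :=
  let s := PySem.Str.lower t
  (acc.1 || PySem.Str.isIn "bf16" s,
   acc.2.1 || PySem.Str.isIn "fp16" s || PySem.Str.isIn "float16" s,
   acc.2.2.1 || PySem.Str.isIn "fp32" s || PySem.Str.isIn "float32" s,
   acc.2.2.2.1 || PySem.Str.isIn "gguf" s,
   acc.2.2.2.2.1 || PySem.Str.isIn "gptq" s,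
   acc.2.2.2.2.2.1 || PySem.Str.isIn "awq" s,
   acc.2.2.2.2.2.2 || PySem.Str.isIn "int8" s || PySem.Str.isIn "int4" s)

def infer_precision_and_quantization_from_tags_py_alt (tags : List String) : String × String :=
  let f := tags.foldl pvFlagsStep (false, false, false, false, false, false, false)
  let precision := if f.1 then "bf16" else if f.2.1 then "fp16" else if f.2.2.1 then "fp32" else ""
  let quant := if f.2.2.2.1 then "gguf" else if f.2.2.2.2.1 then "gptq"
    else if f.2.2.2.2.2.1 then "awq" else if f.2.2.2.2.2.2 then "int" else ""
  (precision, quant)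

-- ===== PRECONDITION & SPEC =====
def Spec_infer_precision_and_quantization_from_tags_py (tags : List String) (out : String × String) : Prop := out = infer_precision_and_quantization_from_tags_py_alt tags
instance (tags : List String) (out : String × String) : Decidable (Spec_infer_precision_and_quantization_from_tags_py tags out) := by unfold Spec_infer_precision_and_quantization_from_tags_py; infer_instance

-- ===== CLAIM (what is proved, stated in full; the proofs are below) =====
def Claim_equal_infer_precision_and_quantization_from_tags_py : Prop := ∀ (tags : List String), Dom_infer_precision_and_quantization_from_tags_py tags → Spec_infer_precision_and_quantization_from_tags_py tags (infer_precision_and_quantization_from_tags_py tags)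

-- ===== LEMMAS AND PROOFS =====
-- the flag fold computes, in each component, 'initial flag OR any tag matches'
theorem pvFlags_foldl (tags : List String) (b1 b2 b3 b4 b5 b6 b7 : Bool) :
    tags.foldl pvFlagsStep (b1, b2, b3, b4, b5, b6, b7) =
      (b1 || tags.any (fun t => PySem.Str.isIn "bf16" (PySem.Str.lower t)),
       b2 || tags.any (fun t => PySem.Str.isIn "fp16" (PySem.Str.lower t) || PySem.Str.isIn "float16" (PySem.Str.lower t)),
       b3 || tags.any (fun t => PySem.Str.isIn "fp32" (PySem.Str.lower t) || PySem.Str.isIn "float32" (PySem.Str.lower t)),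
       b4 || tags.any (fun t => PySem.Str.isIn "gguf" (PySem.Str.lower t)),
       b5 || tags.any (fun t => PySem.Str.isIn "gptq" (PySem.Str.lower t)),
       b6 || tags.any (fun t => PySem.Str.isIn "awq" (PySem.Str.lower t)),
       b7 || tags.any (fun t => PySem.Str.isIn "int8" (PySem.Str.lower t) || PySem.Str.isIn "int4" (PySem.Str.lower t))) := by
  induction tags generalizing b1 b2 b3 b4 b5 b6 b7 with
  | nil => simp
  | cons t rest ih =>
    simp only [List.foldl_cons, List.any_cons, pvFlagsStep, ih]
    simp [Bool.or_assoc]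

-- ===== VERDICT (by name: the statement is the Claim_ definition above) =====
theorem infer_precision_and_quantization_from_tags_py_spec : Claim_equal_infer_precision_and_quantization_from_tags_py := by
  intro tags _
  unfold Spec_infer_precision_and_quantization_from_tags_py
  unfold infer_precision_and_quantization_from_tags_py infer_precision_and_quantization_from_tags_py_alt
  simp [pvFlags_foldl, List.any_map, Function.comp]
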